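-- pv_equiv track=rewrite | github.com/hongyong3/TIL | Algorithm/Swea/D4_4530.py | solve
-- ===== SOURCE A (Python) =====
-- def solve(num):
--     result = 0
--     l = len(str(num))
--     n = str(num)
--     s = 0
--     for i in range(l - 1, - 1, - 1):
--         val = int(n[i])
--         if val > 4:
--             val = val - 1
--         result += val * pow(9, s)
--         s += 1
--     return result - 1
-- ===== SOURCE B (Python) =====
-- def _conv(n):
--     q, r = divmod(n, 10)
--     v = r - 1 if r > 4 else r
--     return v if q == 0 else _conv(q) * 9 + v
--
--
-- def solve(num):
--     return _conv(num) - 1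
-- ===== Notes on version B (the rewrite author's own statement) =====
-- stated objective: alternative
-- what changed: B never builds a string: it recurses on the integer itself with divmod(n, 10), combining results arithmetically, instead of A's reversed indexed loop over str(num) maintaining a power counter and calling pow(9, s) per digit.
import Mathlib
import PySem

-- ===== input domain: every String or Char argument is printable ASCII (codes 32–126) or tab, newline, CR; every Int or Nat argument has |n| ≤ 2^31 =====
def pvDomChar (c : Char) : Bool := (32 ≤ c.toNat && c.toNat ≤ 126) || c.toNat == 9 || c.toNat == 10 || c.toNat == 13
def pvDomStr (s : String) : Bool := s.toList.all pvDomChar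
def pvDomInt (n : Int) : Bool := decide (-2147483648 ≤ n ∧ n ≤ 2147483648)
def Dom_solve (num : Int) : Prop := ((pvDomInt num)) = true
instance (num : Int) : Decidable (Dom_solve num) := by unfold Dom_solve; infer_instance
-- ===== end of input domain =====

-- B recurses on the integer itself with divmod(n, 10) instead of looping over str(num) with powers of 9.
-- Equivalence is about return values on Pre_ (0 ≤ num); on negatives both Pythons raise.

-- int(c) for a single decimal digit character (exact on '0'..'9'; Pre_ excludes the '-' sign case where Python raises)
def pvDigit (c : Char) : Int := (c.toNat : Int) - 48

-- ===== PORT A =====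
-- loop 'for i in range(l-1,-1,-1): val=int(n[i]) …' = left fold over the reversed digit list,
-- state (result, s); 'pow(9, s)' is 9 ^ s with s the loop counter.
def solve (num : Int) : Int :=
  let n := (PySem.Int.toStr num).toList
  let st := n.reverse.foldl (fun (p : Int × Nat) c =>
    let val := pvDigit c
    let val := if val > 4 then val - 1 else val
    (p.1 + val * 9 ^ p.2, p.2 + 1)) (0, 0)
  st.1 - 1

-- ===== PORT B =====
-- '_conv(n)': q, r = divmod(n, 10); v = r-1 if r > 4 else r; v if q == 0 else _conv(q)*9 + v.
-- Recursion on the numeric value; stated on Nat (num.toNat) because the Python only returns for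
-- num ≥ 0 (= Pre_; on negatives its recursion never reaches q == 0), where divmod agrees with Nat / and %.
def pvConv (n : Nat) : Int :=
  let q := n / 10
  let r := n % 10
  let v : Int := if (r : Int) > 4 then (r : Int) - 1 else (r : Int)
  if h : q = 0 then v else pvConv q * 9 + v
decreasing_by exact Nat.div_lt_self (Nat.pos_of_ne_zero (by omega)) (by omega)

def solve_alt (num : Int) : Int := pvConv num.toNat - 1

-- ===== PRECONDITION & SPEC =====
-- Pre_ excludes num < 0, where A's int(n[i]) hits '-' and raises ValueError (B's recursion does not return either).
def Pre_solve (num : Int) : Prop := 0 ≤ num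
instance (num : Int) : Decidable (Pre_solve num) := by unfold Pre_solve; infer_instance
def pvWitness_solve : Int := 47
def Spec_solve (num : Int) (out : Int) : Prop := out = solve_alt num
instance (num : Int) (out : Int) : Decidable (Spec_solve num out) := by unfold Spec_solve; infer_instance

-- ===== CLAIM (what is proved, stated in full; the proofs are below) =====
def Claim_equal_solve : Prop := ∀ (num : Int), Dom_solve num → Pre_solve num → Spec_solve num (solve num)

-- ===== LEMMAS AND PROOFS =====

def pvAdj (c : Char) : Int :=
  let v := pvDigit c
  if v > 4 then v - 1 else v

-- weighted sum of adjusted digits, least-significant first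
def pvW : List Char → Int
  | [] => 0
  | c :: t => pvAdj c + 9 * pvW t

theorem solve_fold (ds : List Char) (r : Int) (s : Nat) :
    (ds.foldl (fun (p : Int × Nat) c =>
      let val := pvDigit c
      let val := if val > 4 then val - 1 else val
      (p.1 + val * 9 ^ p.2, p.2 + 1)) (r, s)).1 = r + 9 ^ s * pvW ds := by
  induction ds generalizing r s with
  | nil => simp [pvW]
  | cons c t ih =>
    simp only [List.foldl, pvW, ih]
    show r + pvAdj c * 9 ^ s + 9 ^ (s + 1) * pvW t = _
    rw [pow_succ]
    ring

-- the msd-first digit-character list of a Nat, by the same recursion as B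
def pvDigits (m : Nat) : List Char :=
  if h : m / 10 = 0 then [Nat.digitChar (m % 10)]
  else pvDigits (m / 10) ++ [Nat.digitChar (m % 10)]
decreasing_by exact Nat.div_lt_self (Nat.pos_of_ne_zero (by omega)) (by omega)

theorem toDigitsCore_eq (f : Nat) : ∀ (m : Nat) (acc : List Char), m < f →
    Nat.toDigitsCore 10 f m acc = pvDigits m ++ acc := by
  induction f with
  | zero => intro m acc h; omega
  | succ f ih =>
    intro m acc h
    rw [Nat.toDigitsCore]
    by_cases hq : m / 10 = 0
    · simp [hq, pvDigits]
    · rw [if_neg hq, ih (m / 10) _ (by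
        have h1 : m / 10 < m := Nat.div_lt_self (Nat.pos_of_ne_zero (by omega)) (by omega)
        omega)]
      conv_rhs => rw [pvDigits]
      simp [hq]

theorem adj_digitChar (r : Nat) (h : r < 10) :
    pvAdj (Nat.digitChar r) = if (r : Int) > 4 then (r : Int) - 1 else (r : Int) := by
  interval_cases r <;> decide

theorem pvW_reverse_digits (m : Nat) : pvW (pvDigits m).reverse = pvConv m := by
  rw [pvDigits, pvConv]
  by_cases hq : m / 10 = 0
  · simp [hq, pvW, adj_digitChar (m % 10) (Nat.mod_lt _ (by omega))]
  · have ih := pvW_reverse_digits (m / 10)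
    simp only [hq, dif_neg, not_false_iff, List.reverse_append, List.reverse_singleton,
      List.singleton_append, pvW, ih, adj_digitChar (m % 10) (Nat.mod_lt _ (by omega))]
    ring
decreasing_by exact Nat.div_lt_self (Nat.pos_of_ne_zero (by omega)) (by omega)

-- ===== VERDICT (by name: the statement is the Claim_ definition above) =====
theorem solve_spec : Claim_equal_solve := by
  intro num _ hpre
  have h0 : (0 : Int) ≤ num := hpre
  show solve num = solve_alt num
  have hts : (PySem.Int.toStr num).toList = Nat.toDigits 10 num.toNat := by
    rw [PySem.Int.toList_toStr, PySem.Int.toChars, if_neg (by omega)]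
  simp only [solve, solve_alt, hts, solve_fold]
  rw [Nat.toDigits, toDigitsCore_eq _ _ _ (Nat.lt_succ_self _)]
  simp [pvW_reverse_digits]
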